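-- pv_equiv track=rewrite | github.com/DwijanX/ConcursoPrograUsingPythonPractice | BestIndex.py | getSpecialSum
-- ===== SOURCE A (Python) =====
-- from collections import deque
--
-- def getSpecialSum(array,i):
--     queueaux=deque(array[i:])
--     order=1
--     Sum=0
--     while(order<=len(queueaux)):
--         for j in range(order):
--             Sum+=int(queueaux.popleft())
--         order+=1
--     return Sum
-- ===== SOURCE B (Python) =====
-- import math
--
-- def getSpecialSum(array, i):
--     sub = array[i:]
--     n = len(sub)
--     K = (math.isqrt(8 * n + 1) - 1) // 2
--     m = K * (K + 1) // 2
--     return sum(int(x) for x in sub[:m])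
-- ===== Notes on version B (the rewrite author's own statement) =====
-- stated objective: simpler
-- what changed: Replaces the deque simulation (nested while/for popping growing groups) with a closed-form count of the summed prefix via integer square root followed by one flat sum.
import Mathlib
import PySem

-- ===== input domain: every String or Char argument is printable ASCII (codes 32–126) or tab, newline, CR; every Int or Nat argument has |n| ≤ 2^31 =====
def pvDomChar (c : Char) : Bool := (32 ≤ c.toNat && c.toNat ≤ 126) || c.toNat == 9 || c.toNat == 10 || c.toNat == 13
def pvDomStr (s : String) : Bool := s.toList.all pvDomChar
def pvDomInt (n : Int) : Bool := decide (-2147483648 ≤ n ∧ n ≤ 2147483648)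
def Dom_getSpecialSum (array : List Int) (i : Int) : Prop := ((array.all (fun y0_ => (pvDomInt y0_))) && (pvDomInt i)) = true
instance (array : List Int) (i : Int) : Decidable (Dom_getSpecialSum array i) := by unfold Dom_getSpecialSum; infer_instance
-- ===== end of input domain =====

-- B replaces A's deque simulation (nested while/for popping growing groups) with a
-- closed-form count of the summed prefix length via integer square root and one flat sum
-- (objective: simpler); return values agree on all inputs.

-- ===== PORT A =====
-- A's while loop: state is the queue (popped from the front), the current group size
-- `order` (here `k+1`, since order ≥ 1 always) and the running Sum; the inner
-- `for j in range(order): Sum += int(queueaux.popleft())` is the foldl over the first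
-- `k+1` elements, after which the queue is the remaining `drop (k+1)`.
def pvLoopA (q : List Int) (k : Nat) (s : Int) : Int :=
  if k + 1 ≤ q.length then
    pvLoopA (q.drop (k+1)) (k+1) (List.foldl (fun acc x => acc + x) s (q.take (k+1)))
  else s
termination_by q.length
decreasing_by simp; omega

def getSpecialSum (array : List Int) (i : Int) : Int :=
  pvLoopA (PySem.List.slice array (some i) none) 0 0

-- ===== PORT B =====
def getSpecialSum_alt (array : List Int) (i : Int) : Int :=
  let sub := PySem.List.slice array (some i) none
  let n := sub.length
  let K := (Nat.sqrt (8 * n + 1) - 1) / 2          -- math.isqrt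
  let m := K * (K + 1) / 2
  (PySem.List.slice sub none (some ((m : Nat) : Int))).sum

-- ===== PRECONDITION & SPEC =====
def Spec_getSpecialSum (array : List Int) (i : Int) (out : Int) : Prop := out = getSpecialSum_alt array i
instance (array : List Int) (i : Int) (out : Int) : Decidable (Spec_getSpecialSum array i out) := by unfold Spec_getSpecialSum; infer_instance

-- ===== CLAIM (what is proved, stated in full; the proofs are below) =====
def Claim_equal_getSpecialSum : Prop := ∀ (array : List Int) (i : Int), Dom_getSpecialSum array i → Spec_getSpecialSum array i (getSpecialSum array i)

-- ===== LEMMAS AND PROOFS =====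

-- number of elements A's loop consumes from a queue of length n, starting at order k+1
def pvConsume (n k : Nat) : Nat :=
  if k + 1 ≤ n then (k+1) + pvConsume (n - (k+1)) (k+1) else 0
termination_by n

-- isqrt-derived K of B
def pvK (x : Nat) : Nat := (Nat.sqrt (8 * x + 1) - 1) / 2

lemma pv_foldl_add (l : List Int) (s : Int) :
    List.foldl (fun acc x => acc + x) s l = s + l.sum := by
  induction l generalizing s with
  | nil => simp
  | cons x xs ih => simp [List.foldl, ih, List.sum_cons]; ring

lemma pvLoopA_eq (q : List Int) (k : Nat) (s : Int) :
    pvLoopA q k s = s + (q.take (pvConsume q.length k)).sum := by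
  fun_induction pvLoopA q k s with
  | case1 q k s h ih =>
    have hc : pvConsume q.length k = (k+1) + pvConsume (q.length - (k+1)) (k+1) := by
      rw [pvConsume]; simp [h]
    rw [List.length_drop] at ih
    have hsplit : List.take ((k+1) + pvConsume (q.length - (k+1)) (k+1)) q
        = List.take (k+1) q ++ List.take (pvConsume (q.length - (k+1)) (k+1)) (List.drop (k+1) q) :=
      List.take_add ..
    rw [ih, pv_foldl_add, hc, hsplit, List.sum_append]
    ring
  | case2 q k s h =>
    have hc : pvConsume q.length k = 0 := by
      rw [pvConsume]; simp [h]
    simp [hc]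

-- K := pvK x is the unique K with K(K+1) ≤ 2x < (K+1)(K+2)
lemma pvK_bound (x : Nat) : pvK x * (pvK x + 1) ≤ 2 * x ∧ 2 * x < (pvK x + 1) * (pvK x + 2) := by
  have h1 := Nat.sqrt_le' (8*x+1)
  have h2 := Nat.lt_succ_sqrt' (8*x+1)
  obtain ⟨a, ha⟩ | ⟨a, ha⟩ := Nat.even_or_odd (Nat.sqrt (8*x+1))
  · -- sqrt = a + a (even); a = 0 is impossible, and for a = b+1, K = b
    rw [ha] at h1 h2
    rcases a with _ | b
    · simp at h2
    · have hK : pvK x = b := by unfold pvK; rw [ha]; omega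
      rw [hK]
      constructor <;> nlinarith
  · -- sqrt = 2a + 1 (odd); K = a
    rw [ha] at h1 h2
    have hK : pvK x = a := by unfold pvK; rw [ha]; omega
    rw [hK]
    constructor <;> nlinarith

lemma pvK_unique (x a : Nat) (h1 : a * (a+1) ≤ 2*x) (h2 : 2*x < (a+1) * (a+2)) :
    pvK x = a := by
  obtain ⟨b1, b2⟩ := pvK_bound x
  rcases lt_trichotomy (pvK x) a with h | h | h
  · have := Nat.mul_le_mul (show pvK x + 1 ≤ a by omega) (show pvK x + 2 ≤ a + 1 by omega)
    omega
  · exact h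
  · have := Nat.mul_le_mul (show a + 1 ≤ pvK x by omega) (show a + 2 ≤ pvK x + 1 by omega)
    omega

lemma pvConsume_closed (n k t : Nat) (ht : 2 * t = k * (k+1)) :
    2 * pvConsume n k + 2 * t = pvK (n + t) * (pvK (n + t) + 1) := by
  fun_induction pvConsume n k generalizing t with
  | case1 n k h ih =>
    have ht' : 2 * (t + (k+1)) = (k+1) * ((k+1)+1) := by ring_nf; ring_nf at ht; omega
    have ih' := ih (t + (k+1)) ht'
    have harg : n - (k+1) + (t + (k+1)) = n + t := by omega
    rw [harg] at ih'
    omega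
  | case2 n k h =>
    have hk : pvK (n + t) = k := by
      apply pvK_unique
      · omega
      · have : (k+1) * (k+2) = k * (k+1) + 2 * (k+1) := by ring
        omega
    rw [hk]; omega

-- the consumed count equals B's m = K(K+1)/2 with K = pvK n
lemma pvConsume_zero (n : Nat) : pvConsume n 0 = pvK n * (pvK n + 1) / 2 := by
  have h := pvConsume_closed n 0 0 (by ring)
  simp only [Nat.add_zero] at h
  omega

-- ===== VERDICT (by name: the statement is the Claim_ definition above) =====
theorem getSpecialSum_spec : Claim_equal_getSpecialSum := by
  unfold Claim_equal_getSpecialSum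
  intro array i _
  unfold Spec_getSpecialSum getSpecialSum getSpecialSum_alt
  simp only []
  rw [pvLoopA_eq, pvConsume_zero, PySem.List.slice_to_natCast]
  simp [pvK]
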